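-- pv_equiv track=rewrite | github.com/haoweilou/LatentSpeech | ipa.py | english_to_alphabet
-- ===== SOURCE A (Python) =====
-- def english_to_alphabet(sentence:str):
--     sentence = sentence.lower()
--     words = sentence.split(" ")
--
--     alphabet_phonemes = ["|"]
--     stresses = [0]
--     for word in words:
--         for char in word:
--             if not char.isalpha(): continue
--             alphabet_phonemes.append(char)
--             stresses.append(0)
--         alphabet_phonemes.append("|")
--         stresses.append(0)
--     return alphabet_phonemes, stresses
-- ===== SOURCE B (Python) =====
-- def english_to_alphabet(sentence: str):
--     alphabet_phonemes = ["|"]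
--     for char in sentence.lower():
--         if char.isalpha():
--             alphabet_phonemes.append(char)
--         elif char == " ":
--             alphabet_phonemes.append("|")
--     alphabet_phonemes.append("|")
--     return alphabet_phonemes, [0] * len(alphabet_phonemes)
-- ===== Notes on version B (the rewrite author's own statement) =====
-- stated objective: simpler
-- what changed: B drops the split-into-words step: one flat pass over the lowered string turns alphabetic chars into themselves and literal spaces into '|' boundaries, and the stress list is derived once as [0]*len instead of being appended in lockstep.
import Mathlib
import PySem

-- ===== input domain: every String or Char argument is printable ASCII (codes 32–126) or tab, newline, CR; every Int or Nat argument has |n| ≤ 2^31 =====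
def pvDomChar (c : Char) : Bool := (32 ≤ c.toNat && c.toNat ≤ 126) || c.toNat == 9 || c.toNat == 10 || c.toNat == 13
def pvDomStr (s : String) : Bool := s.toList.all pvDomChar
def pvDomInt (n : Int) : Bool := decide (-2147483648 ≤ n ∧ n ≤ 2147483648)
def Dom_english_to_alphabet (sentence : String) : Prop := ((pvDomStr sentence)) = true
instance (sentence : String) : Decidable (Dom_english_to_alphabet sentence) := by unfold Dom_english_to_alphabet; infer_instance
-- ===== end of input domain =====

-- B replaces A's split(" ") + nested words/chars loops by one flat pass over the
-- lowered string (space -> '|') and derives the stress list from the final length (simpler).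


-- ===== PORT A =====
-- body of A's 'for word in words' loop: the chars of the word, then the '|' separator
def pvAWord (acc : List String × List Int) (word : List Char) : List String × List Int :=
  let acc := word.foldl (fun acc char =>
    if PySem.Chars.isalpha char = false then acc
    else (acc.1 ++ [String.ofList [char]], acc.2 ++ [(0 : Int)])) acc
  (acc.1 ++ ["|"], acc.2 ++ [(0 : Int)])

def english_to_alphabet (sentence : String) : List String × List Int :=
  let lowered := PySem.Chars.lower sentence.toList
  let words := PySem.Chars.splitOn lowered [' ']
  words.foldl pvAWord (["|"], [(0 : Int)])

-- ===== PORT B =====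
def english_to_alphabet_alt (sentence : String) : List String × List Int :=
  let phonemes := (PySem.Chars.lower sentence.toList).foldl
    (fun acc c =>
      if PySem.Chars.isalpha c then acc ++ [String.ofList [c]]
      else if c = ' ' then acc ++ ["|"]
      else acc) ["|"]
  let phonemes := phonemes ++ ["|"]
  (phonemes, List.replicate phonemes.length (0 : Int))

-- ===== PRECONDITION & SPEC =====
def Spec_english_to_alphabet (sentence : String) (out : List String × List Int) : Prop := out = english_to_alphabet_alt sentence
instance (sentence : String) (out : List String × List Int) : Decidable (Spec_english_to_alphabet sentence out) := by unfold Spec_english_to_alphabet; infer_instance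

-- ===== CLAIM (what is proved, stated in full; the proofs are below) =====
def Claim_equal_english_to_alphabet : Prop := ∀ (sentence : String), Dom_english_to_alphabet sentence → Spec_english_to_alphabet sentence (english_to_alphabet sentence)

-- ===== LEMMAS AND PROOFS =====

-- PySem's splitOn with a single-char separator is Mathlib's List.splitOnP
lemma splitOn_go_single (s : Char) :
    ∀ (fuel : Nat) (l cur : List Char) (acc : List (List Char)), l.length ≤ fuel →
      PySem.Chars.splitOn.go [s] fuel l cur acc
        = acc.reverse ++ (List.splitOnP (· == s) l).modifyHead (cur.reverse ++ ·) := by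
  intro fuel
  induction fuel with
  | zero =>
    intro l cur acc h
    have : l = [] := List.length_eq_zero_iff.mp (Nat.le_zero.mp h)
    subst this
    simp [PySem.Chars.splitOn.go, List.splitOnP_nil]
  | succ n ih =>
    intro l cur acc h
    cases l with
    | nil => simp [PySem.Chars.splitOn.go, List.splitOnP_nil]
    | cons c rest =>
      simp only [PySem.Chars.splitOn.go]
      by_cases hc : c = s
      · subst hc
        have hp : [c].isPrefixOf (c :: rest) = true := by simp [List.isPrefixOf]
        rw [if_pos hp]
        have hdrop : List.drop [c].length (c :: rest) = rest := by simp
        rw [hdrop, ih rest [] _ (by simpa using h)]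
        simp only [List.splitOnP_cons]
        simp only [beq_self_eq_true, if_true, List.modifyHead_cons, List.append_nil,
          List.reverse_cons, List.append_assoc]
        cases List.splitOnP (fun x => x == c) rest <;> simp
      · have hp : [s].isPrefixOf (c :: rest) = false := by
          simp [List.isPrefixOf]; exact fun hh => (hc hh.symm).elim
        rw [if_neg (by simp [hp])]
        rw [ih rest (c :: cur) acc (by simpa using h)]
        have hne : (c == s) = false := by simp [hc]
        simp [List.splitOnP_cons, hne]
        cases hsp : List.splitOnP (· == s) rest with
        | nil => exact absurd hsp (List.splitOnP_ne_nil _ _)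
        | cons a t => simp

lemma splitOn_single (s : Char) (l : List Char) :
    PySem.Chars.splitOn l [s] = List.splitOnP (· == s) l := by
  simp only [PySem.Chars.splitOn]
  rw [splitOn_go_single s (l.length + 1) l [] [] (by omega)]
  cases List.splitOnP (· == s) l <;> simp

-- A's char step on the phoneme list alone, and B's flat step
def pvAStep (acc : List String) (c : Char) : List String :=
  if PySem.Chars.isalpha c = false then acc else acc ++ [String.ofList [c]]

def pvBStep (acc : List String) (c : Char) : List String :=
  if PySem.Chars.isalpha c then acc ++ [String.ofList [c]]
  else if c = ' ' then acc ++ ["|"]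
  else acc

lemma inner_fst (w : List Char) : ∀ (acc : List String × List Int),
    (w.foldl (fun acc char =>
      if PySem.Chars.isalpha char = false then acc
      else (acc.1 ++ [String.ofList [char]], acc.2 ++ [(0 : Int)])) acc).1
    = w.foldl pvAStep acc.1 := by
  induction w with
  | nil => intro acc; rfl
  | cons c rest ih =>
    intro acc
    simp only [List.foldl_cons, ih]
    by_cases h : PySem.Chars.isalpha c = false <;> simp [pvAStep, h]

lemma pvAWord_fst (acc : List String × List Int) (w : List Char) :
    (pvAWord acc w).1 = w.foldl pvAStep acc.1 ++ ["|"] := by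
  simp [pvAWord, inner_fst]

-- lockstep invariant: A's stresses list is always replicate (len fst) 0
lemma inner_snd (w : List Char) : ∀ (acc : List String × List Int),
    acc.2 = List.replicate acc.1.length 0 →
    (w.foldl (fun acc char =>
      if PySem.Chars.isalpha char = false then acc
      else (acc.1 ++ [String.ofList [char]], acc.2 ++ [(0 : Int)])) acc).2
    = List.replicate (w.foldl (fun acc char =>
      if PySem.Chars.isalpha char = false then acc
      else (acc.1 ++ [String.ofList [char]], acc.2 ++ [(0 : Int)])) acc).1.length 0 := by
  induction w with
  | nil => intro acc h; exact h
  | cons c rest ih =>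
    intro acc h
    simp only [List.foldl_cons]
    by_cases hc : PySem.Chars.isalpha c = false
    · simp only [hc, if_true]; exact ih acc h
    · simp only [hc]
      exact ih _ (by simp [h, List.replicate_succ'])

lemma pvAWord_snd (acc : List String × List Int) (w : List Char)
    (h : acc.2 = List.replicate acc.1.length 0) :
    (pvAWord acc w).2 = List.replicate (pvAWord acc w).1.length 0 := by
  simp only [pvAWord]
  simp [inner_snd w acc h, List.replicate_succ']

lemma foldl_pvAWord_snd (ws : List (List Char)) : ∀ (acc : List String × List Int),
    acc.2 = List.replicate acc.1.length 0 →
    (ws.foldl pvAWord acc).2 = List.replicate (ws.foldl pvAWord acc).1.length 0 := by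
  induction ws with
  | nil => intro acc h; exact h
  | cons w rest ih =>
    intro acc h
    exact ih _ (pvAWord_snd acc w h)

lemma foldl_pvAWord_fst (ws : List (List Char)) : ∀ (acc : List String × List Int),
    (ws.foldl pvAWord acc).1 = ws.foldl (fun a w => w.foldl pvAStep a ++ ["|"]) acc.1 := by
  induction ws with
  | nil => intro acc; rfl
  | cons w rest ih =>
    intro acc
    simp only [List.foldl_cons, ih, pvAWord_fst]

-- key: A's word loop over the splitOnP pieces = B's flat pass, generalized over the pending prefix
lemma split_fold_eq_flat (l : List Char) :
    ∀ (cur : List Char) (acc : List String),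
      ((List.splitOnP (· == ' ') l).modifyHead (cur ++ ·)).foldl
          (fun a w => w.foldl pvAStep a ++ ["|"]) acc
        = l.foldl pvBStep (cur.foldl pvAStep acc) ++ ["|"] := by
  induction l with
  | nil =>
    intro cur acc
    simp [List.splitOnP_nil]
  | cons c rest ih =>
    intro cur acc
    cases hsp : List.splitOnP (· == ' ') rest with
    | nil => exact absurd hsp (List.splitOnP_ne_nil _ _)
    | cons a t =>
      by_cases hc : c = ' '
      · subst hc
        have h1 := ih [] (cur.foldl pvAStep acc ++ ["|"])
        rw [hsp] at h1
        simp only [List.modifyHead_cons, List.nil_append, List.foldl_nil] at h1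
        simp only [List.splitOnP_cons, beq_self_eq_true, if_true, hsp,
          List.modifyHead_cons, List.append_nil, List.foldl_cons]
        simp only [List.foldl_cons] at h1
        have ha : PySem.Chars.isalpha ' ' = false := by decide
        have hb : pvBStep (cur.foldl pvAStep acc) ' ' = cur.foldl pvAStep acc ++ ["|"] := by
          simp [pvBStep, ha]
        rw [hb]
        exact h1
      · have hne : (c == ' ') = false := by simp [hc]
        have h1 := ih (cur ++ [c]) acc
        rw [hsp] at h1
        simp only [List.modifyHead_cons, List.append_assoc, List.singleton_append] at h1
        simp only [List.splitOnP_cons, hne, Bool.false_eq_true, if_false, hsp,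
          List.modifyHead_cons]
        rw [h1]
        have h2 : (cur ++ [c]).foldl pvAStep acc = pvBStep (cur.foldl pvAStep acc) c := by
          simp only [List.foldl_append, List.foldl_cons, List.foldl_nil]
          by_cases ha : PySem.Chars.isalpha c <;> simp [pvAStep, pvBStep, ha, hc]
        rw [h2, List.foldl_cons]

lemma fst_eq (l : List Char) :
    ((PySem.Chars.splitOn l [' ']).foldl pvAWord (["|"], [(0 : Int)])).1
      = l.foldl pvBStep ["|"] ++ ["|"] := by
  rw [foldl_pvAWord_fst, splitOn_single]
  have h := split_fold_eq_flat l [] ["|"]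
  have hmod : (List.splitOnP (· == ' ') l).modifyHead (([] : List Char) ++ ·)
      = List.splitOnP (· == ' ') l := by
    cases List.splitOnP (· == ' ') l <;> simp
  rw [hmod] at h
  simpa using h

-- ===== VERDICT (by name: the statement is the Claim_ definition above) =====
theorem english_to_alphabet_spec : Claim_equal_english_to_alphabet := by
  intro s _
  unfold Spec_english_to_alphabet english_to_alphabet english_to_alphabet_alt
  have hB : (fun (acc : List String) (c : Char) =>
      if PySem.Chars.isalpha c then acc ++ [String.ofList [c]]
      else if c = ' ' then acc ++ ["|"] else acc) = pvBStep := rfl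
  simp only [hB]
  apply Prod.ext
  · exact fst_eq (PySem.Chars.lower s.toList)
  · rw [foldl_pvAWord_snd _ _ (by simp), fst_eq (PySem.Chars.lower s.toList)]
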